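-- pv_equiv track=rewrite | github.com/elp2/advent_of_code | 2017/11.py | collapse_steps
-- ===== SOURCE A (Python) =====
-- from collections import defaultdict
--
-- OPPOSITES={'n': 's', 's': 'n', 'ne': 'sw', 'sw': 'ne', 'nw': 'se', 'se': 'nw'}
--
-- def collapse_steps(steps):
--     def ret_zero(): return 0
--     collapsed = defaultdict(ret_zero)
--     for step in steps:
--         opp = OPPOSITES[step]
--         if collapsed[opp] > 0:
--             collapsed[opp] -=1
--         else:
--             collapsed[step] += 1
--
--     for key in list(collapsed.keys()):
--         if collapsed[key] == 0:
--             del collapsed[key]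
--     return collapsed
-- ===== SOURCE B (Python) =====
-- from collections import defaultdict
--
-- OPPOSITES = {'n': 's', 's': 'n', 'ne': 'sw', 'sw': 'ne', 'nw': 'se', 'se': 'nw'}
--
-- def collapse_steps(steps):
--     # One counting pass, then a closed-form net per opposite pair (no step-by-step cancellation).
--     def ret_zero(): return 0
--     counts = {}
--     pairs = []  # opposite pairs in order of first appearance, (opposite-of-first-step, first-step)
--     for step in steps:
--         opp = OPPOSITES[step]
--         if step not in counts and opp not in counts:
--             pairs.append((opp, step))
--         counts[step] = counts.get(step, 0) + 1
--     ret = defaultdict(ret_zero)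
--     for a, b in pairs:
--         net = counts.get(b, 0) - counts.get(a, 0)
--         if net > 0:
--             ret[b] = net
--         elif net < 0:
--             ret[a] = -net
--     return ret
-- ===== Notes on version B (the rewrite author's own statement) =====
-- stated objective: simpler
-- what changed: A cancels opposite steps one by one while mutating a running defaultdict and then deletes zero entries; B counts all steps in one pass and emits, per opposite pair in order of first appearance, the closed-form net count[d]-count[opposite] only when it is non-zero.
import Mathlib
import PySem

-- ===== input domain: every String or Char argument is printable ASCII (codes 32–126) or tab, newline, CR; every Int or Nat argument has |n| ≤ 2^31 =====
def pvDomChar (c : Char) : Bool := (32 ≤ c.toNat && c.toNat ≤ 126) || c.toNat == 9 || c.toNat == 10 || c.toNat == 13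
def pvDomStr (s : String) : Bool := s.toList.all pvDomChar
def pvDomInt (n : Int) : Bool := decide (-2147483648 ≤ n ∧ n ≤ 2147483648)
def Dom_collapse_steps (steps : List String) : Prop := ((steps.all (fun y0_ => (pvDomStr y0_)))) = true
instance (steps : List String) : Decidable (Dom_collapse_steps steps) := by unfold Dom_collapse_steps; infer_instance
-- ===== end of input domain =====

-- B replaces A's step-by-step opposite-cancellation loop by one counting pass plus a closed-form
-- net per opposite pair (objective: simpler/alternative; both Pythons return a fresh dict, no argument mutation).

-- module constant OPPOSITES
def pyOPPOSITES : PySem.Dict String String :=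
  PySem.Dict.ofList [("n","s"),("s","n"),("ne","sw"),("sw","ne"),("nw","se"),("se","nw")]

-- OPPOSITES[step]; a missing key is a KeyError in Python, excluded by Pre_ (the "" default is never read there)
def oppOf (s : String) : String := (pyOPPOSITES.get? s).getD ""

-- ===== PORT A =====
-- defaultdict(ret_zero) __getitem__: returns the stored value, inserting the default 0 when absent
def ddGet (d : PySem.Dict String Int) (k : String) : PySem.Dict String Int × Int :=
  match d.get? k with
  | some v => (d, v)
  | none   => (d.insert k 0, 0)

-- one iteration of A's first loop
def stepA (d : PySem.Dict String Int) (step : String) : PySem.Dict String Int :=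
  let opp := oppOf step
  let p := ddGet d opp
  if p.2 > 0 then p.1.insert opp (p.2 - 1)
  else
    let q := ddGet p.1 step
    q.1.insert step (q.2 + 1)

-- one iteration of A's deletion loop (collapsed[key] is again a defaultdict access)
def eraseStep (d : PySem.Dict String Int) (key : String) : PySem.Dict String Int :=
  let p := ddGet d key
  if p.2 = 0 then p.1.erase key else p.1

def collapse_steps (steps : List String) : List (String × Int) :=
  let collapsed := steps.foldl stepA PySem.Dict.empty
  (collapsed.keys.foldl eraseStep collapsed).items

-- ===== PORT B =====
-- one iteration of B's counting loop: record a fresh opposite pair, bump the count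
def stepB (acc : PySem.Dict String Int × List (String × String)) (step : String) :
    PySem.Dict String Int × List (String × String) :=
  let counts := acc.1
  let opp := oppOf step
  let pairs := if counts.contains step = false ∧ counts.contains opp = false
               then acc.2 ++ [(opp, step)] else acc.2
  (counts.insert step (counts.getD step 0 + 1), pairs)

-- one iteration of B's output loop: the signed net of one opposite pair
def stepR (counts : PySem.Dict String Int) (r : PySem.Dict String Int) (pr : String × String) :
    PySem.Dict String Int :=
  let net := counts.getD pr.2 0 - counts.getD pr.1 0
  if net > 0 then r.insert pr.2 net
  else if net < 0 then r.insert pr.1 (-net)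
  else r

def collapse_steps_alt (steps : List String) : List (String × Int) :=
  let acc := steps.foldl stepB (PySem.Dict.empty, [])
  (acc.2.foldl (stepR acc.1) PySem.Dict.empty).items

-- ===== PRECONDITION & SPEC =====
-- Pre_ excludes exactly the inputs on which A raises KeyError (a step that is not one of the six directions).
def Pre_collapse_steps (steps : List String) : Prop :=
  ∀ s ∈ steps, s ∈ ["n", "s", "ne", "sw", "nw", "se"]
instance (steps : List String) : Decidable (Pre_collapse_steps steps) := by
  unfold Pre_collapse_steps; infer_instance

def pvWitness_collapse_steps : List String := ["ne", "ne", "s", "sw", "n", "sw"]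

def Spec_collapse_steps (steps : List String) (out : List (String × Int)) : Prop :=
  out = collapse_steps_alt steps
instance (steps : List String) (out : List (String × Int)) : Decidable (Spec_collapse_steps steps out) := by
  unfold Spec_collapse_steps; infer_instance

-- ===== CLAIM (what is proved, stated in full; the proofs are below) =====
def Claim_equal_collapse_steps : Prop :=
  ∀ (steps : List String), Dom_collapse_steps steps → Pre_collapse_steps steps →
    Spec_collapse_steps steps (collapse_steps steps)

-- ===== LEMMAS AND PROOFS =====

def dirs : List String := ["n", "s", "ne", "sw", "nw", "se"]

-- all elements of the recorded pairs, in order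
def elems (pairs : List (String × String)) : List String := pairs.flatMap (fun p => [p.1, p.2])

-- how A's dict reads off B's (counts, pairs) state
def blockOf (c : String → Int) (p : String × String) : List (String × Int) :=
  [(p.1, max 0 (c p.1 - c p.2)), (p.2, max 0 (c p.2 - c p.1))]

def render (counts : PySem.Dict String Int) (pairs : List (String × String)) : List (String × Int) :=
  pairs.flatMap (blockOf (fun x => counts.getD x 0))

-- what both final loops produce
def netBlock (c : String → Int) (p : String × String) : List (String × Int) :=
  let n := c p.2 - c p.1
  if n > 0 then [(p.2, n)] else if n < 0 then [(p.1, -n)] else []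

structure StInv (counts : PySem.Dict String Int) (pairs : List (String × String))
    (d : PySem.Dict String Int) : Prop where
  hwf : ∀ p ∈ pairs, p.2 ∈ dirs ∧ p.1 = oppOf p.2
  hnd : (elems pairs).Nodup
  hkeys : ∀ x, counts.contains x = true → x ∈ dirs
  hmem : ∀ x ∈ dirs, (counts.contains x = true ∨ counts.contains (oppOf x) = true) ↔ x ∈ elems pairs
  hd : d.items = render counts pairs

theorem opp_mem {x : String} (h : x ∈ dirs) : oppOf x ∈ dirs := by
  fin_cases h <;> decide

theorem opp_opp {x : String} (h : x ∈ dirs) : oppOf (oppOf x) = x := by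
  fin_cases h <;> decide

theorem opp_ne {x : String} (h : x ∈ dirs) : oppOf x ≠ x := by
  fin_cases h <;> decide

theorem elems_cons (p : String × String) (ps : List (String × String)) :
    elems (p :: ps) = p.1 :: p.2 :: elems ps := by simp [elems]

theorem elems_append (l1 l2 : List (String × String)) :
    elems (l1 ++ l2) = elems l1 ++ elems l2 := by simp [elems]

theorem mem_elems {x : String} {pairs : List (String × String)} :
    x ∈ elems pairs ↔ ∃ p ∈ pairs, x = p.1 ∨ x = p.2 := by
  simp [elems, List.mem_flatMap]

theorem render_congr (c1 c2 : String → Int) (pairs : List (String × String))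
    (h : ∀ x ∈ elems pairs, c1 x = c2 x) :
    pairs.flatMap (blockOf c1) = pairs.flatMap (blockOf c2) := by
  induction pairs with
  | nil => rfl
  | cons p ps ih =>
    rw [List.flatMap_cons, List.flatMap_cons,
      ih (fun x hx => h x (by rw [elems_cons]; exact List.mem_cons_of_mem _ (List.mem_cons_of_mem _ hx)))]
    have h1 : c1 p.1 = c2 p.1 := h p.1 (by rw [elems_cons]; exact List.mem_cons_self)
    have h2 : c1 p.2 = c2 p.2 := h p.2 (by rw [elems_cons]; exact List.mem_cons_of_mem _ List.mem_cons_self)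
    simp [blockOf, h1, h2]

theorem map_fst_render (c : String → Int) (pairs : List (String × String)) :
    (pairs.flatMap (blockOf c)).map Prod.fst = elems pairs := by
  induction pairs with
  | nil => rfl
  | cons p ps ih => simp [blockOf, List.flatMap_cons, elems_cons, ih]

theorem map_upd_render (c c' : String → Int) (tk : String) (w : Int)
    (P : List (String × String))
    (hc : ∀ x ∈ elems P, c' x = c x) (hk : tk ∉ elems P) :
    (P.flatMap (blockOf c)).map (fun q => if q.1 == tk then (tk, w) else q)
      = P.flatMap (blockOf c') := by
  induction P with
  | nil => rfl
  | cons p ps ih =>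
    rw [List.flatMap_cons, List.flatMap_cons, List.map_append,
      ih (fun x hx => hc x (by rw [elems_cons]; exact List.mem_cons_of_mem _ (List.mem_cons_of_mem _ hx)))
         (fun hx => hk (by rw [elems_cons]; exact List.mem_cons_of_mem _ (List.mem_cons_of_mem _ hx)))]
    have h1m : p.1 ∈ elems (p :: ps) := by rw [elems_cons]; exact List.mem_cons_self
    have h2m : p.2 ∈ elems (p :: ps) := by rw [elems_cons]; exact List.mem_cons_of_mem _ List.mem_cons_self
    have h1 : p.1 ≠ tk := fun h => hk (h ▸ h1m)
    have h2 : p.2 ≠ tk := fun h => hk (h ▸ h2m)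
    have c1 : c' p.1 = c p.1 := hc p.1 h1m
    have c2 : c' p.2 = c p.2 := hc p.2 h2m
    simp [blockOf, h1, h2, c1, c2]

theorem render_update (c c' : String → Int) (P1 P2 : List (String × String))
    (p : String × String) (tk : String) (w : Int)
    (hc1 : ∀ x ∈ elems P1, c' x = c x) (hk1 : tk ∉ elems P1)
    (hc2 : ∀ x ∈ elems P2, c' x = c x) (hk2 : tk ∉ elems P2)
    (hmid : (blockOf c p).map (fun q => if q.1 == tk then (tk, w) else q) = blockOf c' p) :
    ((P1 ++ p :: P2).flatMap (blockOf c)).map (fun q => if q.1 == tk then (tk, w) else q)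
      = (P1 ++ p :: P2).flatMap (blockOf c') := by
  rw [List.flatMap_append, List.flatMap_cons, List.flatMap_append, List.flatMap_cons,
    List.map_append, List.map_append, map_upd_render c c' tk w P1 hc1 hk1,
    map_upd_render c c' tk w P2 hc2 hk2, hmid]

theorem step_inv (counts : PySem.Dict String Int) (pairs : List (String × String))
    (d : PySem.Dict String Int) (s : String) (hs : s ∈ dirs) (h : StInv counts pairs d) :
    StInv (stepB (counts, pairs) s).1 (stepB (counts, pairs) s).2 (stepA d s) := by
  obtain ⟨hwf, hnd, hkeys, hmem, hd⟩ := h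
  have hodirs : oppOf s ∈ dirs := opp_mem hs
  have hoo : oppOf (oppOf s) = s := opp_opp hs
  have hons : oppOf s ≠ s := opp_ne hs
  have hkeysd : d.keys = elems pairs := by
    simp only [PySem.Dict.keys, hd, render, map_fst_render]
  have hkeysnd : d.keys.Nodup := by rw [hkeysd]; exact hnd
  have hoppne : ∀ x ∈ dirs, x ≠ s → x ≠ oppOf s → oppOf x ≠ s := by
    intro x hx _ hxo hq
    exact hxo (by rw [← opp_opp hx, hq])
  by_cases hin : s ∈ elems pairs
  · -- the opposite pair of s is already recorded: both keys are in the dict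
    obtain ⟨p, hp, hsp⟩ := mem_elems.mp hin
    obtain ⟨hp2d, hp1o⟩ := hwf p hp
    have hporient : p = (oppOf s, s) ∨ p = (s, oppOf s) := by
      rcases hsp with h1 | h2
      · right
        have h2 : p.2 = oppOf s := by
          have hq := congrArg oppOf hp1o
          rw [opp_opp hp2d] at hq
          rw [← hq, ← h1]
        exact Prod.ext h1.symm h2
      · left
        exact Prod.ext (by rw [hp1o, ← h2]) h2.symm
    have hoin : oppOf s ∈ elems pairs := by
      refine mem_elems.mpr ⟨p, hp, ?_⟩
      rcases hporient with rfl | rfl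
      · exact Or.inl rfl
      · exact Or.inr rfl
    have hcon : counts.contains s = true ∨ counts.contains (oppOf s) = true := (hmem s hs).mpr hin
    have hcondB : ¬(counts.contains s = false ∧ counts.contains (oppOf s) = false) := by
      rcases hcon with hq | hq <;> simp [hq]
    have hB : stepB (counts, pairs) s = (counts.insert s (counts.getD s 0 + 1), pairs) := by
      simp only [stepB, if_neg hcondB]
    have hmemO : (oppOf s, max 0 (counts.getD (oppOf s) 0 - counts.getD s 0)) ∈ d.items := by
      rw [hd, render]
      refine List.mem_flatMap.mpr ⟨p, hp, ?_⟩
      rcases hporient with rfl | rfl <;> simp [blockOf]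
    have hmemS : (s, max 0 (counts.getD s 0 - counts.getD (oppOf s) 0)) ∈ d.items := by
      rw [hd, render]
      refine List.mem_flatMap.mpr ⟨p, hp, ?_⟩
      rcases hporient with rfl | rfl <;> simp [blockOf]
    have hgeto : d.get? (oppOf s) = some (max 0 (counts.getD (oppOf s) 0 - counts.getD s 0)) :=
      PySem.Dict.get?_of_mem_items d hmemO hkeysnd
    have hgets : d.get? s = some (max 0 (counts.getD s 0 - counts.getD (oppOf s) 0)) :=
      PySem.Dict.get?_of_mem_items d hmemS hkeysnd
    have hconto : d.contains (oppOf s) = true := by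
      rw [PySem.Dict.contains_iff_mem_keys, hkeysd]; exact hoin
    have hconts : d.contains s = true := by
      rw [PySem.Dict.contains_iff_mem_keys, hkeysd]; exact hin
    have hkeys' : ∀ x, (counts.insert s (counts.getD s 0 + 1)).contains x = true → x ∈ dirs := by
      intro x hx
      rw [PySem.Dict.contains_insert] at hx
      rcases Bool.or_eq_true_iff.mp hx with hq | hq
      · exact (beq_iff_eq.mp hq) ▸ hs
      · exact hkeys x hq
    have hmem' : ∀ x ∈ dirs,
        ((counts.insert s (counts.getD s 0 + 1)).contains x = true ∨
          (counts.insert s (counts.getD s 0 + 1)).contains (oppOf x) = true) ↔ x ∈ elems pairs := by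
      intro x hx
      rw [PySem.Dict.contains_insert, PySem.Dict.contains_insert]
      by_cases hxs : x = s
      · subst hxs; simp [hin]
      · by_cases hxo : x = oppOf s
        · subst hxo
          simp [hoo, hoin]
        · have hopx : oppOf x ≠ s := hoppne x hx hxs hxo
          have h1 : (x == s) = false := by simp [hxs]
          have h2 : (oppOf x == s) = false := by simp [hopx]
          rw [h1, h2]
          simp only [Bool.false_or]
          exact hmem x hx
    have hcget : ∀ x, (counts.insert s (counts.getD s 0 + 1)).getD x 0
        = if x = s then counts.getD s 0 + 1 else counts.getD x 0 := by
      intro x; exact PySem.Dict.getD_insert counts s x _ 0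
    obtain ⟨P1, P2, hdec⟩ := List.append_of_mem hp
    have hndE : (elems P1 ++ (p.1 :: p.2 :: elems P2)).Nodup := by
      rw [← elems_cons, ← elems_append, ← hdec]; exact hnd
    obtain ⟨hnd1, hnd2, hdisj⟩ := List.nodup_append.mp hndE
    have h1nP1 : p.1 ∉ elems P1 := fun hq => (hdisj p.1 hq p.1 List.mem_cons_self) rfl
    have h2nP1 : p.2 ∉ elems P1 := fun hq =>
      (hdisj p.2 hq p.2 (List.mem_cons_of_mem _ List.mem_cons_self)) rfl
    have h12 : p.1 ∉ p.2 :: elems P2 := (List.nodup_cons.mp hnd2).1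
    have h1nP2 : p.1 ∉ elems P2 := fun hq => h12 (List.mem_cons_of_mem _ hq)
    have h2nP2 : p.2 ∉ elems P2 := (List.nodup_cons.mp (List.nodup_cons.mp hnd2).2).1
    have hsnP1 : s ∉ elems P1 := by
      rcases hporient with rfl | rfl
      · exact h2nP1
      · exact h1nP1
    have honP1 : oppOf s ∉ elems P1 := by
      rcases hporient with rfl | rfl
      · exact h1nP1
      · exact h2nP1
    have hsnP2 : s ∉ elems P2 := by
      rcases hporient with rfl | rfl
      · exact h2nP2
      · exact h1nP2
    have honP2 : oppOf s ∉ elems P2 := by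
      rcases hporient with rfl | rfl
      · exact h1nP2
      · exact h2nP2
    have hc1 : ∀ x ∈ elems P1,
        (if x = s then counts.getD s 0 + 1 else counts.getD x 0) = counts.getD x 0 := by
      intro x hx
      have hxs : x ≠ s := fun hq => hsnP1 (hq ▸ hx)
      simp [hxs]
    have hc2 : ∀ x ∈ elems P2,
        (if x = s then counts.getD s 0 + 1 else counts.getD x 0) = counts.getD x 0 := by
      intro x hx
      have hxs : x ≠ s := fun hq => hsnP2 (hq ▸ hx)
      simp [hxs]
    rw [hB]
    show StInv (counts.insert s (counts.getD s 0 + 1)) pairs (stepA d s)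
    by_cases hv : 0 < counts.getD (oppOf s) 0 - counts.getD s 0
    · -- cancellation branch: collapsed[opp] -= 1
      have hvmax : max 0 (counts.getD (oppOf s) 0 - counts.getD s 0) > 0 := by omega
      have hA : stepA d s = d.insert (oppOf s)
          (max 0 (counts.getD (oppOf s) 0 - counts.getD s 0) - 1) := by
        simp only [stepA, ddGet, hgeto, if_pos hvmax]
      rw [hA]
      refine ⟨hwf, hnd, hkeys', hmem', ?_⟩
      rw [PySem.Dict.items_insert_of_contains _ _ hconto, hd, render, render,
        render_congr (fun x => (counts.insert s (counts.getD s 0 + 1)).getD x 0)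
          (fun x => if x = s then counts.getD s 0 + 1 else counts.getD x 0) pairs
          (fun x _ => hcget x), hdec]
      refine render_update _ _ P1 P2 p _ _ hc1 honP1 hc2 honP2 ?_
      rcases hporient with hpe | hpe <;> rw [hpe] <;>
        · simp only [blockOf, List.map_cons, List.map_nil]
          simp [hons, Ne.symm hons] <;> omega
    · -- accumulation branch: collapsed[step] += 1
      have hvmax : ¬ (max 0 (counts.getD (oppOf s) 0 - counts.getD s 0) > 0) := by omega
      have hA : stepA d s = d.insert s
          (max 0 (counts.getD s 0 - counts.getD (oppOf s) 0) + 1) := by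
        simp only [stepA, ddGet, hgeto, if_neg hvmax, hgets]
      rw [hA]
      refine ⟨hwf, hnd, hkeys', hmem', ?_⟩
      rw [PySem.Dict.items_insert_of_contains _ _ hconts, hd, render, render,
        render_congr (fun x => (counts.insert s (counts.getD s 0 + 1)).getD x 0)
          (fun x => if x = s then counts.getD s 0 + 1 else counts.getD x 0) pairs
          (fun x _ => hcget x), hdec]
      refine render_update _ _ P1 P2 p _ _ hc1 hsnP1 hc2 hsnP2 ?_
      rcases hporient with hpe | hpe <;> rw [hpe] <;>
        · simp only [blockOf, List.map_cons, List.map_nil]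
          simp [hons, Ne.symm hons] <;> omega
  · -- fresh pair: defaultdict inserts opp with 0, then step with 1
    have hcs : counts.contains s = false := by
      by_contra hq
      exact hin ((hmem s hs).mp (Or.inl (by simpa using hq)))
    have hco : counts.contains (oppOf s) = false := by
      by_contra hq
      exact hin ((hmem s hs).mp (Or.inr (by simpa using hq)))
    have honin : oppOf s ∉ elems pairs := by
      intro hq
      have hq' := (hmem (oppOf s) hodirs).mpr hq
      rw [hoo] at hq'
      simp [hco, hcs] at hq'
    have hg0 : counts.getD s 0 = 0 := PySem.Dict.getD_of_not_contains counts 0 hcs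
    have hg0o : counts.getD (oppOf s) 0 = 0 := PySem.Dict.getD_of_not_contains counts 0 hco
    have hB : stepB (counts, pairs) s
        = (counts.insert s (0 + 1), pairs ++ [(oppOf s, s)]) := by
      simp only [stepB, if_pos (And.intro hcs hco), hg0]
    have hcds : d.contains s = false := by
      rw [← Bool.not_eq_true, PySem.Dict.contains_iff_mem_keys, hkeysd]; exact hin
    have hcdo : d.contains (oppOf s) = false := by
      rw [← Bool.not_eq_true, PySem.Dict.contains_iff_mem_keys, hkeysd]; exact honin
    have hgeto : d.get? (oppOf s) = none := by
      rw [PySem.Dict.get?_eq_none_iff_not_mem_keys, hkeysd]; exact honin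
    have hgets : (d.insert (oppOf s) 0).get? s = none := by
      rw [PySem.Dict.get?_insert_of_ne _ _ (Ne.symm hons),
        PySem.Dict.get?_eq_none_iff_not_mem_keys, hkeysd]
      exact hin
    have hA : stepA d s = (d.insert (oppOf s) 0).insert s (0 + 1) := by
      simp only [stepA, ddGet, hgeto, hgets]
      norm_num [PySem.Dict.insert_insert_self]
    have hcins : (d.insert (oppOf s) 0).contains s = false := by
      rw [PySem.Dict.contains_insert]
      simp [Ne.symm hons, hcds]
    rw [hB, hA]
    show StInv (counts.insert s (0 + 1)) (pairs ++ [(oppOf s, s)])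
      ((d.insert (oppOf s) 0).insert s (0 + 1))
    refine ⟨?_, ?_, ?_, ?_, ?_⟩
    · intro q hq
      rcases List.mem_append.mp hq with hq | hq
      · exact hwf q hq
      · rcases List.mem_singleton.mp hq with rfl
        exact ⟨hs, hoo.symm ▸ rfl⟩
    · show (elems (pairs ++ [(oppOf s, s)])).Nodup
      rw [elems_append]
      have hE : elems [(oppOf s, s)] = [oppOf s, s] := by simp [elems]
      rw [hE]
      refine List.nodup_append.mpr ⟨hnd, by simp [hons], ?_⟩
      intro a ha b hb
      rcases List.mem_cons.mp hb with rfl | hb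
      · exact fun hq => honin (hq ▸ ha)
      · rcases List.mem_singleton.mp hb with rfl
        exact fun hq => hin (hq ▸ ha)
    · intro x hx
      rw [PySem.Dict.contains_insert] at hx
      rcases Bool.or_eq_true_iff.mp hx with hq | hq
      · exact (beq_iff_eq.mp hq) ▸ hs
      · exact hkeys x hq
    · intro x hx
      show ((counts.insert s (0 + 1)).contains x = true ∨
          (counts.insert s (0 + 1)).contains (oppOf x) = true) ↔ x ∈ elems (pairs ++ [(oppOf s, s)])
      rw [PySem.Dict.contains_insert, PySem.Dict.contains_insert, elems_append]
      have hE : elems [(oppOf s, s)] = [oppOf s, s] := by simp [elems]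
      rw [hE]
      by_cases hxs : x = s
      · subst hxs; simp
      · by_cases hxo : x = oppOf s
        · subst hxo; simp [hoo]
        · have hopx : oppOf x ≠ s := hoppne x hx hxs hxo
          have hrw : x ∈ elems pairs ++ [oppOf s, s] ↔ x ∈ elems pairs := by
            simp [hxs, hxo]
          have h1 : (x == s) = false := by simp [hxs]
          have h2 : (oppOf x == s) = false := by simp [hopx]
          rw [h1, h2]
          simp only [Bool.false_or]
          exact (hmem x hx).trans hrw.symm
    · show ((d.insert (oppOf s) 0).insert s (0 + 1)).items
        = render (counts.insert s (0 + 1)) (pairs ++ [(oppOf s, s)])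
      rw [PySem.Dict.items_insert_of_not_contains _ _ hcins,
        PySem.Dict.items_insert_of_not_contains _ _ hcdo, hd, render, render,
        List.flatMap_append, List.flatMap_cons, List.flatMap_nil,
        render_congr (fun x => (counts.insert s (0 + 1)).getD x 0)
          (fun x => counts.getD x 0) pairs (fun x hx => by
            have hxs : x ≠ s := fun hq => hin (hq ▸ hx)
            exact PySem.Dict.getD_insert_of_ne _ _ _ hxs)]
      have hb : blockOf (fun x => (counts.insert s (0 + 1)).getD x 0) (oppOf s, s)
          = [(oppOf s, 0), (s, 0 + 1)] := by
        simp only [blockOf]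
        rw [PySem.Dict.getD_insert_of_ne _ _ _ hons, PySem.Dict.getD_insert_self, hg0o]
        norm_num
      rw [hb]
      simp
theorem loop_inv (rest : List String) (counts : PySem.Dict String Int)
    (pairs : List (String × String)) (d : PySem.Dict String Int)
    (h : StInv counts pairs d) (hrest : ∀ s ∈ rest, s ∈ dirs) :
    StInv (rest.foldl stepB (counts, pairs)).1 (rest.foldl stepB (counts, pairs)).2
      (rest.foldl stepA d) := by
  induction rest generalizing counts pairs d with
  | nil => exact h
  | cons s rest ih =>
    have h' := step_inv counts pairs d s (hrest s (List.mem_cons_self)) h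
    simpa using ih (stepB (counts, pairs) s).1 (stepB (counts, pairs) s).2 (stepA d s) h'
      (fun t ht => hrest t (List.mem_cons_of_mem _ ht))

theorem erase_loop (l : List (String × Int)) :
    ∀ pre : List (String × Int), ((pre ++ l).map Prod.fst).Nodup →
    ((l.map Prod.fst).foldl eraseStep (PySem.Dict.mk (pre ++ l))).items
      = pre ++ l.filter (fun p => !(p.2 == 0)) := by
  induction l with
  | nil => intro pre _; simp
  | cons kv rest ih =>
    intro pre hnd
    obtain ⟨k, v⟩ := kv
    have hnd' : (pre.map Prod.fst ++ (k :: rest.map Prod.fst)).Nodup := by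
      simpa using hnd
    have hknp : k ∉ pre.map Prod.fst := by
      intro h
      exact ((List.nodup_append.mp hnd').2.2 k h k List.mem_cons_self) rfl
    have hknr : k ∉ rest.map Prod.fst :=
      (List.nodup_cons.mp (List.nodup_append.mp hnd').2.1).1
    have hget : (PySem.Dict.mk (pre ++ (k, v) :: rest)).get? k = some v := by
      simp only [PySem.Dict.get?]
      rw [List.find?_append]
      have hfn : pre.find? (fun p => p.1 == k) = none := by
        rw [List.find?_eq_none]
        intro p hp hpk
        exact hknp (List.mem_map.mpr ⟨p, hp, by simpa using hpk⟩)
      simp [hfn]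
    have hpre : pre.filter (fun p => !(p.1 == k)) = pre := by
      rw [List.filter_eq_self]
      intro p hp
      simp only [Bool.not_eq_eq_eq_not, Bool.not_true, beq_eq_false_iff_ne, ne_eq]
      exact fun h => hknp (List.mem_map.mpr ⟨p, hp, h⟩)
    have hrest : rest.filter (fun p => !(p.1 == k)) = rest := by
      rw [List.filter_eq_self]
      intro p hp
      simp only [Bool.not_eq_eq_eq_not, Bool.not_true, beq_eq_false_iff_ne, ne_eq]
      exact fun h => hknr (List.mem_map.mpr ⟨p, hp, h⟩)
    by_cases hv : v = 0
    · subst hv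
      have hstep : eraseStep (PySem.Dict.mk (pre ++ (k, 0) :: rest)) k
          = PySem.Dict.mk (pre ++ rest) := by
        simp only [eraseStep, ddGet, hget]
        simp only [PySem.Dict.erase]
        rw [List.filter_append, List.filter_cons]
        simp [hpre, hrest]
      rw [List.map_cons, List.foldl_cons, hstep, ih pre ?_]
      · simp
      · have : ((pre ++ rest).map Prod.fst).Sublist ((pre ++ (k, 0) :: rest).map Prod.fst) := by
          apply List.Sublist.map
          exact List.Sublist.append_left (List.sublist_cons_self _ _) pre
        exact this.nodup hnd
    · have hstep : eraseStep (PySem.Dict.mk (pre ++ (k, v) :: rest)) k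
          = PySem.Dict.mk ((pre ++ [(k, v)]) ++ rest) := by
        simp only [eraseStep, ddGet, hget]
        simp [hv]
      rw [List.map_cons, List.foldl_cons, hstep, ih (pre ++ [(k, v)]) (by simpa using hnd)]
      simp [hv]
theorem b_loop (c : PySem.Dict String Int) (pairs : List (String × String)) :
    ∀ r : PySem.Dict String Int, (∀ x ∈ elems pairs, r.contains x = false) →
    (elems pairs).Nodup →
    (pairs.foldl (stepR c) r).items
      = r.items ++ pairs.flatMap (netBlock (fun x => c.getD x 0)) := by
  induction pairs with
  | nil => intro r _ _; simp
  | cons p ps ih =>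
    intro r hfresh hnd
    rw [elems_cons] at hfresh hnd
    have hp1 : r.contains p.1 = false := hfresh p.1 List.mem_cons_self
    have hp2 : r.contains p.2 = false := hfresh p.2 (List.mem_cons_of_mem _ List.mem_cons_self)
    have hnd' : (elems ps).Nodup := (List.nodup_cons.mp (List.nodup_cons.mp hnd).2).2
    have h1nin : p.1 ∉ elems ps := fun h =>
      (List.nodup_cons.mp hnd).1 (List.mem_cons_of_mem _ h)
    have h2nin : p.2 ∉ elems ps := (List.nodup_cons.mp (List.nodup_cons.mp hnd).2).1
    rw [List.foldl_cons, List.flatMap_cons]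
    set n := c.getD p.2 0 - c.getD p.1 0 with hn
    by_cases hpos : n > 0
    · have hs : stepR c r p = r.insert p.2 n := by simp [stepR, ← hn, hpos]
      rw [hs, ih (r.insert p.2 n) ?_ hnd']
      · rw [PySem.Dict.items_insert_of_not_contains _ _ hp2]
        simp [netBlock, ← hn, hpos]
      · intro x hx
        rw [PySem.Dict.contains_insert]
        have hxne : x ≠ p.2 := fun h => h2nin (h ▸ hx)
        simp [hxne, hfresh x (List.mem_cons_of_mem _ (List.mem_cons_of_mem _ hx))]
    · by_cases hneg : n < 0
      · have hs : stepR c r p = r.insert p.1 (-n) := by simp [stepR, ← hn, hpos, hneg]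
        rw [hs, ih (r.insert p.1 (-n)) ?_ hnd']
        · rw [PySem.Dict.items_insert_of_not_contains _ _ hp1]
          simp [netBlock, ← hn, hpos, hneg]
        · intro x hx
          rw [PySem.Dict.contains_insert]
          have hxne : x ≠ p.1 := fun h => h1nin (h ▸ hx)
          simp [hxne, hfresh x (List.mem_cons_of_mem _ (List.mem_cons_of_mem _ hx))]
      · have hs : stepR c r p = r := by simp [stepR, ← hn, hpos, hneg]
        rw [hs, ih r (fun x hx => hfresh x (List.mem_cons_of_mem _ (List.mem_cons_of_mem _ hx))) hnd']
        have hz : netBlock (fun x => c.getD x 0) p = [] := by simp [netBlock, ← hn, hpos, hneg]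
        simp [hz]
theorem filter_render (c : String → Int) (pairs : List (String × String)) :
    (pairs.flatMap (blockOf c)).filter (fun p => !(p.2 == 0))
      = pairs.flatMap (netBlock c) := by
  induction pairs with
  | nil => rfl
  | cons p ps ih =>
    rw [List.flatMap_cons, List.flatMap_cons, List.filter_append, ih]
    congr 1
    rcases lt_trichotomy (c p.2 - c p.1) 0 with h | h | h
    · have e1 : max 0 (c p.1 - c p.2) = c p.1 - c p.2 := by omega
      have e2 : max 0 (c p.2 - c p.1) = 0 := by omega
      have hne : ¬(c p.1 - c p.2 = 0) := by omega
      have hng : ¬(c p.2 - c p.1 > 0) := by omega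
      simp only [blockOf, netBlock, e1, e2, List.filter_cons, List.filter_nil]
      simp [hne, h]
      omega
    · have e1 : max 0 (c p.1 - c p.2) = 0 := by omega
      have e2 : max 0 (c p.2 - c p.1) = 0 := by omega
      have hng : ¬(c p.2 - c p.1 > 0) := by omega
      have hnl : ¬(c p.2 - c p.1 < 0) := by omega
      simp only [blockOf, netBlock, e1, e2, List.filter_cons, List.filter_nil]
      simp [hnl]
      omega
    · have e1 : max 0 (c p.1 - c p.2) = 0 := by omega
      have e2 : max 0 (c p.2 - c p.1) = c p.2 - c p.1 := by omega
      have hne : ¬(c p.2 - c p.1 = 0) := by omega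
      have hgt : ¬(c p.2 ≤ c p.1) := by omega
      simp only [blockOf, netBlock, e1, e2, List.filter_cons, List.filter_nil]
      simp [hne, hgt]
-- ===== VERDICT (by name: the statement is the Claim_ definition above) =====
theorem collapse_steps_spec : Claim_equal_collapse_steps := by
  intro steps _ hpre
  unfold Spec_collapse_steps
  have hsteps : ∀ s ∈ steps, s ∈ dirs := hpre
  have hinit : StInv PySem.Dict.empty [] PySem.Dict.empty := by
    refine ⟨?_, ?_, ?_, ?_, ?_⟩
    · intro p hp; cases hp
    · exact List.nodup_nil
    · intro x hx; rw [PySem.Dict.contains_empty] at hx; cases hx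
    · intro x _; simp [PySem.Dict.contains_empty, elems]
    · rfl
  have hInv := loop_inv steps PySem.Dict.empty [] PySem.Dict.empty hinit hsteps
  obtain ⟨hwf, hnd, hkeys, hmem, hd⟩ := hInv
  set st := steps.foldl stepB (PySem.Dict.empty, ([] : List (String × String))) with hst
  set D := steps.foldl stepA PySem.Dict.empty with hD
  unfold collapse_steps collapse_steps_alt
  show (List.foldl eraseStep D D.keys).items
      = (List.foldl (stepR st.1) PySem.Dict.empty st.2).items
  have hkeysD : D.keys = (render st.1 st.2).map Prod.fst := by
    simp only [PySem.Dict.keys, hd]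
  have hndk : ((([] : List (String × Int)) ++ render st.1 st.2).map Prod.fst).Nodup := by
    simp only [List.nil_append]
    rw [render, map_fst_render]
    exact hnd
  have hDmk : D = PySem.Dict.mk (([] : List (String × Int)) ++ render st.1 st.2) := by
    apply PySem.Dict.ext
    simpa using hd
  rw [hkeysD, hDmk, erase_loop (render st.1 st.2) [] hndk]
  rw [b_loop st.1 st.2 PySem.Dict.empty (fun x _ => PySem.Dict.contains_empty x) hnd]
  rw [render, filter_render]
  simp [PySem.Dict.empty]
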